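-- pv_equiv track=rewrite | github.com/KilianKlaiber/My_Project | new_idea.py | lists_of_ordered_sublists
-- ===== SOURCE A (Python) =====
-- def errorless_pop(liste: list):
--     """Reurn None during pop, if list is empty
--
--     Args:
--         liste (list): random list
--
--     Returns:
--         Popped element, if the list is not empty
--         None, if the list is empty
--         Content oflist is reduced, because list
--         is a mutable data type passed to the function.
--     """
--     try:
--         return liste.pop()
--     except IndexError:
--         return None
--
-- def lists_of_ordered_sublists(int_list: list[int]):
--     """Create listtof ordered sublists
--
--     Args:
--         int_list (list[int]): _description_
--
--     Returns:
--         list[list]: _description_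
--     """
--
--     list_of_sublists = []
--     pop_number = errorless_pop(int_list)
--
--
--     while pop_number != None:
--         if len(list_of_sublists) == 0:
--             list_of_sublists.append([pop_number])
--         else:
--             for item in list_of_sublists:
--                 # append pop to end of item_list, if  pop >  last element of item
--                 if pop_number > item[-1]:
--                     item.append(pop_number)
--                     break
--                 # insert pop item to beginnin of list, if pop < first element of item
--                 elif pop_number < item[0]:
--                     item.insert(0, pop_number)
--                     break
--             # If item was not added to any sublist, append a new sub-list, which
--             # comprises as single element, namely the pop-numer
--             else:
--                 list_of_sublists.append([pop_number])
--         # Pop numbers until the list is empty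
--         pop_number = errorless_pop(int_list)
--
--     return list_of_sublists
-- ===== SOURCE B (Python) =====
-- def lists_of_ordered_sublists(int_list):
--     """Exact re-implementation: the sublists' (min, max) intervals are nested,
--     so the target sublist is found by binary search; prepends are O(1) via a
--     reversed front list. Empties int_list in place like the original (which pops it)."""
--     groups = []  # (mn, mx, front_rev, back): sublist = front_rev[::-1] + back
--     for x in reversed(int_list):
--         lo, hi = 0, len(groups)
--         while lo < hi:
--             mid = (lo + hi) // 2
--             mn, mx = groups[mid][0], groups[mid][1]
--             if x > mx or x < mn:
--                 hi = mid
--             else: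
--                 lo = mid + 1
--         if lo == len(groups):
--             groups.append((x, x, [], [x]))
--         else:
--             mn, mx, front, back = groups[lo]
--             if x > mx:
--                 back.append(x)
--                 groups[lo] = (mn, x, front, back)
--             else:
--                 front.append(x)
--                 groups[lo] = (x, mx, front, back)
--     int_list.clear()
--     return [front[::-1] + back for mn, mx, front, back in groups]
-- ===== Notes on version B (the rewrite author's own statement) =====
-- stated objective: faster
-- what changed: The (min,max) intervals of the sublists are nested, so B replaces A's linear scan over all sublists per element with a binary search over one list of (min,max,front,back) groups, using a reversed front list for O(1) prepends instead of list.insert(0,..).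
import Mathlib
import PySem

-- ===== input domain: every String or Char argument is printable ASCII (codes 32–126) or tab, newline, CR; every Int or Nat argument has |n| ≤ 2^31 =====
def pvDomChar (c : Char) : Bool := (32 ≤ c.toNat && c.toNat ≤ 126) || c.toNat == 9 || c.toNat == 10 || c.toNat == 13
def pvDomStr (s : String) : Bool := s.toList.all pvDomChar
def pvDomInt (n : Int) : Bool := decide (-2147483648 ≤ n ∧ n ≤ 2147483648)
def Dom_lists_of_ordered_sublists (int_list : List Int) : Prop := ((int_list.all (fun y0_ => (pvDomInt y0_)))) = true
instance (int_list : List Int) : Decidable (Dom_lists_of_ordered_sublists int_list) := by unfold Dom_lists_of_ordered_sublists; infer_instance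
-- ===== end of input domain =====

-- B replaces A's per-element linear scan with a binary search over the nested (min,max)
-- intervals of the sublists (objective: faster). Both Pythons consume int_list in place
-- (A pops it empty, B clears it); the equivalence proved here is about the return value.

-- ===== PORT A =====
-- inner for/else over list_of_sublists; `[[x]]` in the nil case is the for-loop's else branch.
-- items are never empty, so the `.getD 0` after item[-1]/item[0] (Python would raise
-- IndexError on an empty item) is unreachable.
def pvScanA (x : Int) : List (List Int) → List (List Int)
  | [] => [[x]]
  | item :: rest =>
    if x > ((PySem.List.pyGet? item (-1)).getD 0) then (item ++ [x]) :: rest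
    else if x < ((PySem.List.pyGet? item 0).getD 0) then (x :: item) :: rest
    else item :: pvScanA x rest

-- the while-loop popping from the end of int_list = a left fold over int_list.reverse
def lists_of_ordered_sublists (int_list : List Int) : List (List Int) :=
  int_list.reverse.foldl (fun subs x => if subs = [] then [[x]] else pvScanA x subs) []

-- ===== PORT B =====
-- a group (mn, mx, front, back) represents the sublist front.reverse ++ back
def pvBS (x : Int) (groups : List (Int × Int × List Int × List Int)) (lo hi : Nat) : Nat :=
  if h : lo < hi then
    let mid := (lo + hi) / 2
    let g := groups.getD mid (0, 0, [], [])
    if x > g.2.1 || x < g.1 then pvBS x groups lo mid else pvBS x groups (mid + 1) hi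
  else lo
termination_by hi - lo
decreasing_by all_goals omega

def pvStepB (groups : List (Int × Int × List Int × List Int)) (x : Int) :
    List (Int × Int × List Int × List Int) :=
  let lo := pvBS x groups 0 groups.length
  if lo = groups.length then groups ++ [(x, x, [], [x])]
  else
    let g := groups.getD lo (0, 0, [], [])
    if x > g.2.1 then groups.set lo (g.1, x, g.2.2.1, g.2.2.2 ++ [x])
    else groups.set lo (x, g.2.1, g.2.2.1 ++ [x], g.2.2.2)

def lists_of_ordered_sublists_alt (int_list : List Int) : List (List Int) :=
  (int_list.reverse.foldl pvStepB []).map (fun g => g.2.2.1.reverse ++ g.2.2.2)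

-- ===== PRECONDITION & SPEC =====
def Spec_lists_of_ordered_sublists (int_list : List Int) (out : List (List Int)) : Prop := out = lists_of_ordered_sublists_alt int_list
instance (int_list : List Int) (out : List (List Int)) : Decidable (Spec_lists_of_ordered_sublists int_list out) := by unfold Spec_lists_of_ordered_sublists; infer_instance

-- ===== CLAIM (what is proved, stated in full; the proofs are below) =====
def Claim_equal_lists_of_ordered_sublists : Prop := ∀ (int_list : List Int), Dom_lists_of_ordered_sublists int_list → Spec_lists_of_ordered_sublists int_list (lists_of_ordered_sublists int_list)

-- ===== LEMMAS AND PROOFS =====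

-- the sublist a group stands for
def pvProj (g : Int × Int × List Int × List Int) : List Int := g.2.2.1.reverse ++ g.2.2.2

-- the test "x lies outside group g's interval"
def pvOut (x : Int) (g : Int × Int × List Int × List Int) : Bool := x > g.2.1 || x < g.1

-- proof-side linear version of pvStepB, structural in the list
def pvUpd (x : Int) (g : Int × Int × List Int × List Int) : Int × Int × List Int × List Int :=
  if x > g.2.1 then (g.1, x, g.2.2.1, g.2.2.2 ++ [x]) else (x, g.2.1, g.2.2.1 ++ [x], g.2.2.2)

def pvStepL (x : Int) : List (Int × Int × List Int × List Int) → List (Int × Int × List Int × List Int)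
  | [] => [(x, x, [], [x])]
  | g :: gs => if pvOut x g then pvUpd x g :: gs else g :: pvStepL x gs

def pvLinIdx (x : Int) : List (Int × Int × List Int × List Int) → Nat
  | [] => 0
  | g :: gs => if pvOut x g then 0 else pvLinIdx x gs + 1

def pvRel (g h : Int × Int × List Int × List Int) : Prop := g.1 ≤ h.1 ∧ h.2.1 ≤ g.2.1

def pvInv (gs : List (Int × Int × List Int × List Int)) : Prop :=
  (∀ g ∈ gs, (pvProj g).head? = some g.1 ∧ (pvProj g).getLast? = some g.2.1) ∧
  gs.Pairwise pvRel

theorem pvLinIdx_le (x : Int) (gs : List (Int × Int × List Int × List Int)) :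
    pvLinIdx x gs ≤ gs.length := by
  induction gs with
  | nil => simp [pvLinIdx]
  | cons g gs ih =>
    simp only [pvLinIdx, List.length_cons]
    split <;> omega

theorem pvLinIdx_not_out (x : Int) (gs : List (Int × Int × List Int × List Int))
    (i : Nat) (hi : i < pvLinIdx x gs) : pvOut x (gs.getD i (0, 0, [], [])) = false := by
  induction gs generalizing i with
  | nil => simp [pvLinIdx] at hi
  | cons g gs ih =>
    simp only [pvLinIdx] at hi
    by_cases h : pvOut x g
    · simp [h] at hi
    · cases i with
      | zero => simpa using h
      | succ i => simp only [List.getD_cons_succ]; exact ih i (by simp [h] at hi; omega)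

theorem pvLinIdx_out (x : Int) (gs : List (Int × Int × List Int × List Int))
    (hp : gs.Pairwise pvRel) (i : Nat) (hk : pvLinIdx x gs ≤ i) (hi : i < gs.length) :
    pvOut x (gs.getD i (0, 0, [], [])) = true := by
  induction gs generalizing i with
  | nil => simp at hi
  | cons g gs ih =>
    simp only [pvLinIdx] at hk
    by_cases h : pvOut x g
    · -- x is outside g's interval, and every later interval is contained in g's
      cases i with
      | zero => simpa using h
      | succ i =>
        simp only [List.getD_cons_succ]
        have hil : i < gs.length := by simpa using hi
        have hmem : gs.getD i (0, 0, [], []) ∈ gs := by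
          rw [List.getD_eq_getElem gs _ hil]; exact List.getElem_mem hil
        have hrel := (List.pairwise_cons.mp hp).1 _ hmem
        simp only [pvOut, decide_eq_true_eq, Bool.or_eq_true] at h ⊢
        rcases h with h | h
        · exact Or.inl (lt_of_le_of_lt hrel.2 h)
        · exact Or.inr (lt_of_lt_of_le h hrel.1)
    · cases i with
      | zero => simp [h] at hk
      | succ i =>
        simp only [List.getD_cons_succ]
        exact ih (List.pairwise_cons.mp hp).2 i (by simp [h] at hk; omega) (by simpa using hi)

theorem pvBS_eq (x : Int) (gs : List (Int × Int × List Int × List Int))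
    (hp : gs.Pairwise pvRel) :
    ∀ (d lo hi : Nat), hi - lo ≤ d → lo ≤ pvLinIdx x gs → pvLinIdx x gs ≤ hi →
      hi ≤ gs.length → pvBS x gs lo hi = pvLinIdx x gs := by
  intro d
  induction d with
  | zero =>
    intro lo hi h1 h2 h3 h4
    rw [pvBS, dif_neg (by omega : ¬ lo < hi)]
    omega
  | succ d ih =>
    intro lo hi h1 h2 h3 h4
    by_cases hlh : lo < hi
    · rw [pvBS, dif_pos hlh]
      show (if pvOut x (gs.getD ((lo + hi) / 2) (0, 0, [], [])) = true
              then pvBS x gs lo ((lo + hi) / 2)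
              else pvBS x gs ((lo + hi) / 2 + 1) hi) = pvLinIdx x gs
      by_cases hout : pvOut x (gs.getD ((lo + hi) / 2) (0, 0, [], [])) = true
      · rw [if_pos hout]
        have hk : pvLinIdx x gs ≤ (lo + hi) / 2 := by
          by_contra hc
          rw [pvLinIdx_not_out x gs _ (by omega)] at hout
          simp at hout
        exact ih lo _ (by omega) h2 hk (by omega)
      · rw [if_neg hout]
        have hk : (lo + hi) / 2 < pvLinIdx x gs := by
          by_contra hc
          exact hout (pvLinIdx_out x gs hp _ (by omega) (by omega))
        exact ih _ hi (by omega) (by omega) h3 h4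
    · rw [pvBS, dif_neg hlh]
      omega

theorem pvStepL_eq_set (x : Int) (gs : List (Int × Int × List Int × List Int)) :
    pvStepL x gs =
      (if pvLinIdx x gs = gs.length then gs ++ [(x, x, [], [x])]
       else if x > (gs.getD (pvLinIdx x gs) (0, 0, [], [])).2.1 then
         gs.set (pvLinIdx x gs) ((gs.getD (pvLinIdx x gs) (0, 0, [], [])).1, x,
           (gs.getD (pvLinIdx x gs) (0, 0, [], [])).2.2.1,
           (gs.getD (pvLinIdx x gs) (0, 0, [], [])).2.2.2 ++ [x])
       else
         gs.set (pvLinIdx x gs) (x, (gs.getD (pvLinIdx x gs) (0, 0, [], [])).2.1,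
           (gs.getD (pvLinIdx x gs) (0, 0, [], [])).2.2.1 ++ [x],
           (gs.getD (pvLinIdx x gs) (0, 0, [], [])).2.2.2)) := by
  induction gs with
  | nil => simp [pvStepL, pvLinIdx]
  | cons g gs ih =>
    by_cases h : pvOut x g
    · simp only [pvStepL, pvLinIdx, if_pos h, List.length_cons, List.getD_cons_zero,
        List.set_cons_zero]
      rw [if_neg (by omega : ¬ (0 : Nat) = gs.length + 1)]
      unfold pvUpd
      split <;> rfl
    · simp only [pvStepL, pvLinIdx, if_neg h, List.length_cons, List.getD_cons_succ,
        List.set_cons_succ]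
      rw [ih]
      by_cases he : pvLinIdx x gs = gs.length
      · simp [he]
      · rw [if_neg he, if_neg (by omega : ¬ pvLinIdx x gs + 1 = gs.length + 1)]
        exact apply_ite (List.cons g) _ _ _

theorem pvStepB_eq_stepL (x : Int) (gs : List (Int × Int × List Int × List Int))
    (hp : gs.Pairwise pvRel) : pvStepB gs x = pvStepL x gs := by
  have hbs : pvBS x gs 0 gs.length = pvLinIdx x gs :=
    pvBS_eq x gs hp gs.length 0 gs.length (by omega) (by omega) (pvLinIdx_le x gs) le_rfl
  rw [pvStepL_eq_set]
  show (if pvBS x gs 0 gs.length = gs.length then gs ++ [(x, x, [], [x])]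
        else if x > (gs.getD (pvBS x gs 0 gs.length) (0, 0, [], [])).2.1 then
          gs.set (pvBS x gs 0 gs.length) ((gs.getD (pvBS x gs 0 gs.length) (0, 0, [], [])).1, x,
            (gs.getD (pvBS x gs 0 gs.length) (0, 0, [], [])).2.2.1,
            (gs.getD (pvBS x gs 0 gs.length) (0, 0, [], [])).2.2.2 ++ [x])
        else
          gs.set (pvBS x gs 0 gs.length) (x, (gs.getD (pvBS x gs 0 gs.length) (0, 0, [], [])).2.1,
            (gs.getD (pvBS x gs 0 gs.length) (0, 0, [], [])).2.2.1 ++ [x],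
            (gs.getD (pvBS x gs 0 gs.length) (0, 0, [], [])).2.2.2)) = _
  rw [hbs]

theorem pvScanA_eq (x : Int) (gs : List (Int × Int × List Int × List Int))
    (hh : ∀ g ∈ gs, (pvProj g).head? = some g.1 ∧ (pvProj g).getLast? = some g.2.1) :
    pvScanA x (gs.map pvProj) = (pvStepL x gs).map pvProj := by
  induction gs with
  | nil => simp [pvScanA, pvStepL, pvProj]
  | cons g gs ih =>
    obtain ⟨hhd, hlast⟩ := hh g (List.mem_cons_self ..)
    have hget : (PySem.List.pyGet? (pvProj g) (-1)).getD 0 = g.2.1 := by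
      rw [PySem.List.pyGet?_neg_one, hlast]; rfl
    have hget0 : (PySem.List.pyGet? (pvProj g) 0).getD 0 = g.1 := by
      rw [PySem.List.pyGet?_zero, ← List.head?_eq_getElem?, hhd]; rfl
    simp only [List.map_cons, pvScanA, hget, hget0]
    by_cases h1 : x > g.2.1
    · have hout : pvOut x g = true := by simp [pvOut, h1]
      rw [if_pos h1]
      simp only [pvStepL, if_pos hout]
      rw [pvUpd, if_pos h1]
      simp [pvProj]
    · rw [if_neg h1]
      by_cases h2 : x < g.1
      · have hout : pvOut x g = true := by simp [pvOut, h2]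
        rw [if_pos h2]
        simp only [pvStepL, if_pos hout]
        rw [pvUpd, if_neg h1]
        simp [pvProj]
      · have hout : ¬ (pvOut x g = true) := by simp [pvOut, h1, h2]
        rw [if_neg h2]
        simp only [pvStepL, if_neg hout, List.map_cons]
        exact congrArg (List.cons (pvProj g)) (ih (fun g hg => hh g (List.mem_cons_of_mem _ hg)))

-- if x lies inside g's interval, relating g to all groups of pvStepL x l needs only pvRel g · on l
theorem pvRel_stepL (x : Int) (g : Int × Int × List Int × List Int)
    (hg1 : g.1 ≤ x) (hg2 : x ≤ g.2.1) :
    ∀ l : List (Int × Int × List Int × List Int),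
      (∀ h ∈ l, pvRel g h) → ∀ h ∈ pvStepL x l, pvRel g h := by
  intro l
  induction l with
  | nil =>
    intro _ h hm
    simp only [pvStepL, List.mem_singleton] at hm
    subst hm
    exact ⟨hg1, hg2⟩
  | cons a l ihl =>
    intro hall h hm
    by_cases ha : pvOut x a
    · simp only [pvStepL, if_pos ha] at hm
      rcases List.mem_cons.mp hm with rfl | hm
      · have hr := hall a (List.mem_cons_self ..)
        unfold pvUpd
        by_cases hxx : x > a.2.1
        · rw [if_pos hxx]
          exact ⟨hr.1, hg2⟩
        · rw [if_neg hxx]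
          exact ⟨hg1, hr.2⟩
      · exact hall h (List.mem_cons_of_mem _ hm)
    · simp only [pvStepL, if_neg ha] at hm
      rcases List.mem_cons.mp hm with rfl | hm
      · exact hall h (List.mem_cons_self ..)
      · exact ihl (fun h' hm' => hall h' (List.mem_cons_of_mem _ hm')) h hm

theorem pvInv_stepL (x : Int) (gs : List (Int × Int × List Int × List Int)) :
    pvInv gs → pvInv (pvStepL x gs) := by
  induction gs with
  | nil =>
    intro _
    refine ⟨?_, ?_⟩
    · intro g hg
      simp only [pvStepL, List.mem_singleton] at hg
      subst hg
      simp [pvProj]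
    · simp [pvStepL]
  | cons g gs ih =>
    intro hinv
    obtain ⟨hh, hp⟩ := hinv
    have hhg := hh g (List.mem_cons_self ..)
    have hhgs : ∀ h ∈ gs, (pvProj h).head? = some h.1 ∧ (pvProj h).getLast? = some h.2.1 :=
      fun h hm => hh h (List.mem_cons_of_mem _ hm)
    obtain ⟨hrelg, hpgs⟩ := List.pairwise_cons.mp hp
    have hne : pvProj g ≠ [] := by
      intro he; rw [he] at hhg; simp at hhg
    by_cases hout : pvOut x g
    · -- g is updated in place, the rest is unchanged
      simp only [pvStepL, if_pos hout]
      refine ⟨?_, ?_⟩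
      · intro h hm
        rcases List.mem_cons.mp hm with rfl | hm
        · unfold pvUpd
          by_cases hxx : x > g.2.1
          · rw [if_pos hxx]
            refine ⟨?_, ?_⟩
            · show (g.2.2.1.reverse ++ (g.2.2.2 ++ [x])).head? = some g.1
              rw [show g.2.2.1.reverse ++ (g.2.2.2 ++ [x]) = pvProj g ++ [x] by simp [pvProj]]
              cases hpg : pvProj g with
              | nil => exact absurd hpg hne
              | cons a l =>
                have h1 := hhg.1
                rw [hpg] at h1
                simpa using h1
            · show (g.2.2.1.reverse ++ (g.2.2.2 ++ [x])).getLast? = some x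
              rw [show g.2.2.1.reverse ++ (g.2.2.2 ++ [x]) = pvProj g ++ [x] by simp [pvProj]]
              simp
          · rw [if_neg hxx]
            refine ⟨?_, ?_⟩
            · show ((g.2.2.1 ++ [x]).reverse ++ g.2.2.2).head? = some x
              rw [show (g.2.2.1 ++ [x]).reverse ++ g.2.2.2 = x :: pvProj g by simp [pvProj]]
              simp
            · show ((g.2.2.1 ++ [x]).reverse ++ g.2.2.2).getLast? = some g.2.1
              rw [show (g.2.2.1 ++ [x]).reverse ++ g.2.2.2 = x :: pvProj g by simp [pvProj]]
              cases hpg : pvProj g with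
              | nil => exact absurd hpg hne
              | cons a l =>
                rw [List.getLast?_cons_cons]
                have h2 := hhg.2
                rw [hpg] at h2
                exact h2
        · exact hhgs h hm
      · rw [List.pairwise_cons]
        refine ⟨fun h hm => ?_, hpgs⟩
        have hr := hrelg h hm
        have hout' : x > g.2.1 ∨ x < g.1 := by simpa [pvOut] using hout
        unfold pvUpd
        by_cases hxx : x > g.2.1
        · rw [if_pos hxx]
          exact ⟨hr.1, le_trans hr.2 (le_of_lt hxx)⟩
        · rw [if_neg hxx]
          exact ⟨le_trans (le_of_lt (hout'.resolve_left hxx)) hr.1, hr.2⟩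
    · -- g is untouched; the element x lands further right
      simp only [pvStepL, if_neg hout]
      have hI := ih ⟨hhgs, hpgs⟩
      have hx : x ≤ g.2.1 ∧ g.1 ≤ x := by simpa [pvOut] using hout
      refine ⟨?_, ?_⟩
      · intro h hm
        rcases List.mem_cons.mp hm with rfl | hm
        · exact hhg
        · exact hI.1 h hm
      · rw [List.pairwise_cons]
        exact ⟨pvRel_stepL x g hx.2 hx.1 gs hrelg, hI.2⟩

theorem pv_main (l : List Int) :
    ∀ gs : List (Int × Int × List Int × List Int), pvInv gs →
      l.foldl (fun subs x => if subs = [] then [[x]] else pvScanA x subs) (gs.map pvProj) =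
        (l.foldl pvStepB gs).map pvProj ∧ pvInv (l.foldl pvStepB gs) := by
  induction l with
  | nil => intro gs hinv; exact ⟨rfl, hinv⟩
  | cons x l ih =>
    intro gs hinv
    have hstep : pvStepB gs x = pvStepL x gs := pvStepB_eq_stepL x gs hinv.2
    have hscan : (if gs.map pvProj = [] then [[x]] else pvScanA x (gs.map pvProj)) =
        (pvStepB gs x).map pvProj := by
      rw [hstep]
      by_cases hgs : gs = []
      · subst hgs; simp [pvStepL, pvProj]
      · rw [if_neg (by simpa using hgs)]
        exact pvScanA_eq x gs hinv.1
    simp only [List.foldl_cons, hscan]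
    exact ih (pvStepB gs x) (hstep ▸ pvInv_stepL x gs hinv)

-- ===== VERDICT (by name: the statement is the Claim_ definition above) =====
theorem lists_of_ordered_sublists_spec : Claim_equal_lists_of_ordered_sublists := by
  intro int_list _
  show _ = _
  unfold lists_of_ordered_sublists lists_of_ordered_sublists_alt
  have := pv_main int_list.reverse [] ⟨by simp, by simp⟩
  simpa using this.1
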